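-- pv_equiv track=rewrite | github.com/key-moon/golf | deflate_optimizer/huffman.py | _check_huffman_lengths
-- ===== SOURCE A (Python) =====
-- def _check_huffman_lengths(lengths: list[int], maxbits: int):
--     bit_counts = [0]*(maxbits+1)
--     for l in lengths:
--         if 0 < l <= maxbits:
--             bit_counts[l] += 1
--
--     left_after_counts = 1
--     for bits in range(1, maxbits+1):
--         left_after_counts <<= 1
--         left_after_counts -= bit_counts[bits] if bits < len(bit_counts) else 0
--     return left_after_counts == 0
-- ===== SOURCE B (Python) =====
-- def _check_huffman_lengths(lengths: list[int], maxbits: int):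
--     if maxbits < 0:
--         return False
--     kraft = sum(1 << (maxbits - l) for l in lengths if 0 < l <= maxbits)
--     return kraft == 1 << maxbits
-- ===== Notes on version B (the rewrite author's own statement) =====
-- stated objective: simpler
-- what changed: Replaces the bit_counts array and the shift-and-subtract loop over range(1, maxbits+1) with a direct one-pass Kraft sum over lengths compared against 1 << maxbits (with a negative-maxbits guard).
import Mathlib
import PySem

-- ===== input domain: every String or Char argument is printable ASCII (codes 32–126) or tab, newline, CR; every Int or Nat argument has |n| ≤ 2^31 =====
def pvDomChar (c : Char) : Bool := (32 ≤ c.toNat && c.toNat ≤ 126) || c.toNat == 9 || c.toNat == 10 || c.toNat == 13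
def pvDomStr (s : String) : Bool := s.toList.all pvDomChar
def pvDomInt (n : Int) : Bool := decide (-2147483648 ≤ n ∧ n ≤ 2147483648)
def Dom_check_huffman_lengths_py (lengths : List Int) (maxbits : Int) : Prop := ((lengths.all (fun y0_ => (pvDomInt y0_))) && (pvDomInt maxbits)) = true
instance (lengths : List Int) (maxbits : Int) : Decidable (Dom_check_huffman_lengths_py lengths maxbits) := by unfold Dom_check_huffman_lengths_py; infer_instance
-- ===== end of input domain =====

-- B replaces A's bit_counts array and shift/subtract loop by a direct one-pass Kraft-sum comparison (simpler decomposition, same results).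


-- ===== PORT A =====
-- literal port of A: build bit_counts, count admitted lengths, then the shift/subtract
-- loop over range(1, maxbits+1); Python's '<<= 1' on an int is exactly '* 2'.
def check_huffman_lengths_py (lengths : List Int) (maxbits : Int) : Bool :=
  let bit_counts : List Int := List.replicate (maxbits + 1).toNat 0
  let bit_counts := lengths.foldl
    (fun bc l =>
      if 0 < l ∧ l ≤ maxbits then
        PySem.List.pySetD bc l (PySem.List.pyGetD bc l 0 + 1)
      else bc) bit_counts
  let left := (PySem.List.pyRange 1 (maxbits + 1) 1).foldl
    (fun left bits =>
      left * 2 - (if bits < (bit_counts.length : Int) then PySem.List.pyGetD bit_counts bits 0 else 0)) 1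
  left == 0

-- ===== PORT B =====
-- literal port of B: guard maxbits < 0, then a one-pass Kraft sum over the admitted
-- lengths; '1 << e' on 0 ≤ e is exactly '2 ^ e'.
def check_huffman_lengths_py_alt (lengths : List Int) (maxbits : Int) : Bool :=
  if maxbits < 0 then false
  else
    let kraft : Int := (lengths.filter (fun l => decide (0 < l) && decide (l ≤ maxbits))).foldl
      (fun s l => s + 2 ^ (maxbits - l).toNat) 0
    kraft == 2 ^ maxbits.toNat

-- ===== PRECONDITION & SPEC =====
def Spec_check_huffman_lengths_py (lengths : List Int) (maxbits : Int) (out : Bool) : Prop := out = check_huffman_lengths_py_alt lengths maxbits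
instance (lengths : List Int) (maxbits : Int) (out : Bool) : Decidable (Spec_check_huffman_lengths_py lengths maxbits out) := by unfold Spec_check_huffman_lengths_py; infer_instance

-- ===== CLAIM (what is proved, stated in full; the proofs are below) =====
def Claim_equal_check_huffman_lengths_py : Prop := ∀ (lengths : List Int) (maxbits : Int), Dom_check_huffman_lengths_py lengths maxbits → Spec_check_huffman_lengths_py lengths maxbits (check_huffman_lengths_py lengths maxbits)

-- ===== LEMMAS AND PROOFS =====

-- weighted sum of counts: exactly the total quantity A's second loop subtracts from 2^k
def pvW (bc : List Int) (k : Nat) : Int :=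
  ((PySem.List.pyRange 1 ((k:Int)+1) 1).map
    (fun b => (if b < (bc.length : Int) then PySem.List.pyGetD bc b 0 else 0) * 2 ^ (k - b.toNat))).sum

-- A's shift/subtract loop computes 2^k minus the weighted count sum
lemma pv_loopA (k : Nat) (bc : List Int) :
    (PySem.List.pyRange 1 ((k:Int)+1) 1).foldl
      (fun left bits => left * 2 - (if bits < (bc.length:Int) then PySem.List.pyGetD bc bits 0 else 0)) 1
    = 2 ^ k - pvW bc k := by
  induction k with
  | zero =>
    rw [show ((0:Nat):Int)+1 = 1 by norm_num, PySem.List.pyRange_one_eq_nil (by norm_num)]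
    simp [pvW, PySem.List.pyRange_one_eq_nil]
  | succ k ih =>
    have hsplit : PySem.List.pyRange 1 (((k+1:Nat):Int)+1) 1
        = PySem.List.pyRange 1 ((k:Int)+1) 1 ++ [(k:Int)+1] := by
      have := PySem.List.pyRange_one_succ_right (a := 1) (b := (k:Int)+1) (by omega)
      push_cast
      rw [this]
    rw [hsplit, List.foldl_append, ih]
    have hW : pvW bc (k+1) = 2 * pvW bc k
        + (if ((k:Int)+1) < (bc.length:Int) then PySem.List.pyGetD bc ((k:Int)+1) 0 else 0) := by
      unfold pvW
      rw [hsplit, List.map_append, List.sum_append]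
      have hlast : (((k:Int)+1)).toNat = k+1 := by omega
      have hcongr : (PySem.List.pyRange 1 ((k:Int)+1) 1).map
            (fun b => (if b < (bc.length : Int) then PySem.List.pyGetD bc b 0 else 0) * 2 ^ (k+1 - b.toNat))
          = (PySem.List.pyRange 1 ((k:Int)+1) 1).map
            (fun b => 2 * ((if b < (bc.length : Int) then PySem.List.pyGetD bc b 0 else 0) * 2 ^ (k - b.toNat))) := by
        apply List.map_congr_left
        intro b hb
        rw [PySem.List.mem_pyRange_one] at hb
        have he : k + 1 - b.toNat = (k - b.toNat) + 1 := by omega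
        rw [he, pow_succ]
        ring
      rw [hcongr, List.sum_map_mul_left]
      simp [hlast]
    simp only [List.foldl_cons, List.foldl_nil]
    rw [hW]
    ring

-- the all-zero counts list has weighted sum 0
lemma pv_W_zero (k : Nat) : pvW (List.replicate (k+1) (0:Int)) k = 0 := by
  unfold pvW
  rw [List.map_congr_left (g := fun _ => (0:Int))]
  · simp
  · intro b hb
    rw [PySem.List.mem_pyRange_one] at hb
    split_ifs with h
    · have hb' : b = ((b.toNat : Nat) : Int) := by omega
      rw [hb', PySem.List.pyGetD_natCast]
      simp [List.getD, List.getElem?_replicate]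
      split <;> simp
    · ring

-- incrementing the count at an admitted length x adds exactly its Kraft weight
lemma pv_W_set (k : Nat) (bc : List Int) (x : Int) (hlen : bc.length = k+1)
    (hx1 : 0 < x) (hx2 : x ≤ (k:Int)) :
    pvW (PySem.List.pySetD bc x (PySem.List.pyGetD bc x 0 + 1)) k
    = pvW bc k + 2 ^ (((k:Int) - x).toNat) := by
  have hxn : x = ((x.toNat : Nat) : Int) := by omega
  set n := x.toNat with hn
  have hnlen : n < bc.length := by omega
  rw [hxn, PySem.List.pyGetD_natCast, PySem.List.pySetD_natCast]
  have hlen' : (bc.set n (bc.getD n 0 + 1)).length = bc.length := by simp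
  unfold pvW
  have h2 : PySem.List.pyRange ((n:Int)) ((k:Int)+1) 1
      = (n:Int) :: PySem.List.pyRange ((n:Int)+1) ((k:Int)+1) 1 :=
    PySem.List.pyRange_one_cons (by omega)
  have hsplit : PySem.List.pyRange 1 ((k:Int)+1) 1
      = PySem.List.pyRange 1 ((n:Int)) 1 ++ ((n:Int) :: PySem.List.pyRange ((n:Int)+1) ((k:Int)+1) 1) := by
    rw [PySem.List.pyRange_one_append 1 ((n:Int)) ((k:Int)+1) (by omega) (by omega), h2]
  rw [hsplit]
  simp only [List.map_append, List.sum_append, List.map_cons, List.sum_cons, hlen']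
  have hside : ∀ b : Int, 1 ≤ b → b ≠ (n:Int) →
      (if b < (bc.length:Int) then PySem.List.pyGetD (bc.set n (bc.getD n 0 + 1)) b 0 else 0)
      = (if b < (bc.length:Int) then PySem.List.pyGetD bc b 0 else 0) := by
    intro b hb1 hbne
    split_ifs with h
    · have hb' : b = ((b.toNat : Nat) : Int) := by omega
      rw [hb', PySem.List.pyGetD_natCast, PySem.List.pyGetD_natCast]
      simp only [List.getD]
      rw [List.getElem?_set_ne (by omega)]
    · rfl
  have hc1 : (PySem.List.pyRange 1 ((n:Int)) 1).map
        (fun b => (if b < (bc.length:Int) then PySem.List.pyGetD (bc.set n (bc.getD n 0 + 1)) b 0 else 0) * 2 ^ (k - b.toNat))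
      = (PySem.List.pyRange 1 ((n:Int)) 1).map
        (fun b => (if b < (bc.length:Int) then PySem.List.pyGetD bc b 0 else 0) * 2 ^ (k - b.toNat)) := by
    apply List.map_congr_left
    intro b hb
    rw [PySem.List.mem_pyRange_one] at hb
    rw [hside b (by omega) (by omega)]
  have hc2 : (PySem.List.pyRange ((n:Int)+1) ((k:Int)+1) 1).map
        (fun b => (if b < (bc.length:Int) then PySem.List.pyGetD (bc.set n (bc.getD n 0 + 1)) b 0 else 0) * 2 ^ (k - b.toNat))
      = (PySem.List.pyRange ((n:Int)+1) ((k:Int)+1) 1).map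
        (fun b => (if b < (bc.length:Int) then PySem.List.pyGetD bc b 0 else 0) * 2 ^ (k - b.toNat)) := by
    apply List.map_congr_left
    intro b hb
    rw [PySem.List.mem_pyRange_one] at hb
    rw [hside b (by omega) (by omega)]
  rw [hc1, hc2]
  have hmid : (if ((n:Int)) < (bc.length:Int) then PySem.List.pyGetD (bc.set n (bc.getD n 0 + 1)) ((n:Int)) 0 else 0)
      = (if ((n:Int)) < (bc.length:Int) then PySem.List.pyGetD bc ((n:Int)) 0 else 0) + 1 := by
    rw [if_pos (by exact_mod_cast hnlen), if_pos (by exact_mod_cast hnlen),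
        PySem.List.pyGetD_natCast, PySem.List.pyGetD_natCast]
    rw [List.getD, List.getD, List.getElem?_set_self (by omega)]
    simp [List.getElem?_eq_getElem hnlen]
  rw [hmid]
  have hexp : ((k:Int) - (n:Int)).toNat = k - n := by omega
  rw [hexp]
  simp only [Int.toNat_natCast]
  ring

-- A's counting loop shifts the weighted sum by the Kraft sum of the admitted lengths
lemma pv_W_fold (k : Nat) (lengths : List Int) : ∀ (bc : List Int), bc.length = k + 1 →
    pvW (lengths.foldl
      (fun bc l =>
        if 0 < l ∧ l ≤ (k:Int) then
          PySem.List.pySetD bc l (PySem.List.pyGetD bc l 0 + 1)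
        else bc) bc) k
    = pvW bc k +
      ((lengths.filter (fun l => decide (0 < l) && decide (l ≤ (k:Int)))).map
        (fun l => (2:Int) ^ (((k:Int) - l).toNat))).sum := by
  induction lengths with
  | nil => intro bc h; simp
  | cons x xs ih =>
    intro bc hlen
    by_cases h : 0 < x ∧ x ≤ (k:Int)
    · have hlen2 : (PySem.List.pySetD bc x (PySem.List.pyGetD bc x 0 + 1)).length = k + 1 := by
        rw [PySem.List.length_pySetD]; exact hlen
      rw [List.foldl_cons, if_pos h, List.filter_cons_of_pos (by simp [h.1, h.2])]
      rw [List.map_cons, List.sum_cons, ih _ hlen2, pv_W_set k bc x hlen h.1 h.2]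
      ring
    · rw [List.foldl_cons, if_neg h, List.filter_cons_of_neg (by simpa using h)]
      exact ih bc hlen

-- B's summing loop is the sum of the mapped Kraft weights
lemma pv_foldB (ls : List Int) (m : Int) (init : Int) :
    ls.foldl (fun s l => s + 2 ^ (m - l).toNat) init = init + (ls.map (fun l => (2:Int) ^ ((m - l).toNat))).sum := by
  induction ls generalizing init with
  | nil => simp
  | cons x xs ih => simp [List.foldl_cons, ih]; ring

-- with maxbits < 0 no length is admitted, so A's counting loop is the identity
lemma pv_fold_neg (lengths : List Int) (maxbits : Int) (hm : maxbits < 0) : ∀ bc : List Int,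
    lengths.foldl
      (fun bc l =>
        if 0 < l ∧ l ≤ maxbits then
          PySem.List.pySetD bc l (PySem.List.pyGetD bc l 0 + 1)
        else bc) bc = bc := by
  induction lengths with
  | nil => intro bc; rfl
  | cons x xs ih =>
    intro bc
    rw [List.foldl_cons, if_neg (by rintro ⟨h1, h2⟩; omega)]
    exact ih bc

theorem pv_main_eq (lengths : List Int) (maxbits : Int) :
    check_huffman_lengths_py lengths maxbits = check_huffman_lengths_py_alt lengths maxbits := by
  by_cases hm : maxbits < 0
  · simp only [check_huffman_lengths_py, check_huffman_lengths_py_alt, if_pos hm]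
    rw [pv_fold_neg lengths maxbits hm, PySem.List.pyRange_one_eq_nil (by omega)]
    simp
  · obtain ⟨k, rfl⟩ : ∃ k : Nat, maxbits = (k:Int) := ⟨maxbits.toNat, by omega⟩
    simp only [check_huffman_lengths_py, check_huffman_lengths_py_alt, if_neg hm]
    have hrep : ((k:Int) + 1).toNat = k + 1 := by omega
    rw [hrep]
    rw [pv_loopA k, pv_W_fold k lengths (List.replicate (k+1) 0) (by simp), pv_W_zero k,
        pv_foldB, Int.toNat_natCast]
    have key : ∀ (s t : Int), ((t - s == 0) : Bool) = (s == t) := by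
      intro s t
      rcases eq_or_ne s t with h | h
      · subst h; simp
      · have h1 : t - s ≠ 0 := by omega
        simp [h1, h]
    exact key _ _

-- ===== VERDICT (by name: the statement is the Claim_ definition above) =====
theorem check_huffman_lengths_py_spec : Claim_equal_check_huffman_lengths_py := by
  intro lengths maxbits _
  exact pv_main_eq lengths maxbits
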